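-- pv_equiv track=rewrite | github.com/ojavellag/Data-Science-notebooks-and-other-processing-tools | ref_classif.py | remove_ending0
-- ===== SOURCE A (Python) =====
-- def remove_ending0(string1):
--     """
--         this function removes the ending of the session in the folder
--         in order to extract the name of the subject. This is internally
--         used by exclude_subjects
--         input:
--         string1 => expects a folder name with sesssion number at the end
--         output:
--         a => folder name without session number
--     """
--     a=[]
--     sess = ['01','02','03','04','05','06','07','08']
--     for str_t in string1:
--         str2 = str_t.split("_")
--         if str2[len(str2)-1] in sess:
--             del str2[len(str2)-1]
--             str3 = "_".join(str2)
--             a.append(str3)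
--         else:
--             a.append(str_t)
--     return a
-- ===== SOURCE B (Python) =====
-- _SESS = ("01", "02", "03", "04", "05", "06", "07", "08")
-- _SESS_SUFFIXES = tuple("_" + t for t in _SESS)
--
--
-- def remove_ending0(string1):
--     # Strip a trailing session code by direct suffix matching instead of
--     # tokenize/inspect/rejoin: a name ending in "_0d" (d in 1..8) loses its
--     # last 3 chars; a bare "0d" collapses to ""; anything else is unchanged.
--     return [
--         s[:-3] if s.endswith(_SESS_SUFFIXES)
--         else "" if s in _SESS
--         else s
--         for s in string1
--     ]
-- ===== Notes on version B (the rewrite author's own statement) =====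
-- stated objective: idiomatic
-- what changed: A tokenizes each name on '_', inspects the last token against the session list and rejoins; B never splits: it matches the string's suffix directly against the eight '_0d' suffixes (slicing off the last 3 chars) and handles the bare '0d' whole-string case by membership, so the tokenize/rejoin pass disappears.
import Mathlib
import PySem

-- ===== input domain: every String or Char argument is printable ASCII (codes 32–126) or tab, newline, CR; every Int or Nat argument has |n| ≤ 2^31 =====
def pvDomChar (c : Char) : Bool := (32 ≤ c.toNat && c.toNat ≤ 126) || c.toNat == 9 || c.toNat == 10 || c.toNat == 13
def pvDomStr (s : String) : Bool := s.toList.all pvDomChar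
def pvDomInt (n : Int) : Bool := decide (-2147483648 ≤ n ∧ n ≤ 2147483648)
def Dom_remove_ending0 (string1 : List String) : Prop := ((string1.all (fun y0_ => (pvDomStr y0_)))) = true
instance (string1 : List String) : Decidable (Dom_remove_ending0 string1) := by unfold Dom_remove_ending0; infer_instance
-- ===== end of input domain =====

-- B replaces A's tokenize/inspect/rejoin with a direct suffix match on each string (idiomatic endswith + slice); return values proved equal on all inputs.

-- ===== PORT A =====
-- sess = ['01','02','03','04','05','06','07','08']  (strings rendered as char lists)
def pvSessA : List (List Char) :=
  [['0','1'], ['0','2'], ['0','3'], ['0','4'], ['0','5'], ['0','6'], ['0','7'], ['0','8']]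

def remove_ending0 (string1 : List String) : List String :=
  string1.foldl
    (fun a str_t =>
      -- str2 = str_t.split("_")
      let str2 : List (List Char) := PySem.Chars.splitOn str_t.toList ['_']
      -- str2[len(str2)-1] in sess  (split never returns an empty list, so the index is in range)
      if PySem.List.pyGetD str2 ((str2.length : Int) - 1) [] ∈ pvSessA then
        -- del str2[len(str2)-1]  (deleting the last element is dropLast);  str3 = "_".join(str2)
        a ++ [String.ofList (PySem.Chars.join ['_'] str2.dropLast)]
      else
        a ++ [str_t])
    []

-- ===== PORT B =====
-- _SESS and _SESS_SUFFIXES tuples of Source B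
def pvSessB : List (List Char) :=
  [['0','1'], ['0','2'], ['0','3'], ['0','4'], ['0','5'], ['0','6'], ['0','7'], ['0','8']]

def pvSessSuffixesB : List (List Char) :=
  [['_','0','1'], ['_','0','2'], ['_','0','3'], ['_','0','4'],
   ['_','0','5'], ['_','0','6'], ['_','0','7'], ['_','0','8']]

def remove_ending0_alt (string1 : List String) : List String :=
  string1.map (fun s =>
    if pvSessSuffixesB.any (fun suf => PySem.Chars.endswith s.toList suf) then
      String.ofList (PySem.List.slice s.toList none (some (-3)))          -- s[:-3]
    else if s.toList ∈ pvSessB then ""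
    else s)

-- ===== PRECONDITION & SPEC =====
def Spec_remove_ending0 (string1 : List String) (out : List String) : Prop := out = remove_ending0_alt string1
instance (string1 : List String) (out : List String) : Decidable (Spec_remove_ending0 string1 out) := by unfold Spec_remove_ending0; infer_instance

-- ===== CLAIM (what is proved, stated in full; the proofs are below) =====
def Claim_equal_remove_ending0 : Prop := ∀ (string1 : List String), Dom_remove_ending0 string1 → Spec_remove_ending0 string1 (remove_ending0 string1)

-- ===== LEMMAS AND PROOFS =====

-- A structural model of str.split("_") used only in the proofs.
def pvSplit : List Char → List (List Char)
  | [] => [[]]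
  | c :: rest =>
    if c = '_' then [] :: pvSplit rest
    else
      match pvSplit rest with
      | [] => [[c]]
      | t :: ts => (c :: t) :: ts

lemma pvSplit_ne_nil (cs : List Char) : pvSplit cs ≠ [] := by
  cases cs with
  | nil => simp [pvSplit]
  | cons c rest =>
    simp only [pvSplit]
    split
    · simp
    · cases h : pvSplit rest <;> simp

lemma pvGo_eq (fuel : Nat) : ∀ (l cur : List Char) (acc : List (List Char)),
    l.length < fuel →
    PySem.Chars.splitOn.go ['_'] fuel l cur acc
      = acc.reverse ++ (pvSplit l).modifyHead (cur.reverse ++ ·) := by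
  induction fuel with
  | zero => intro l cur acc h; omega
  | succ fuel ih =>
    intro l cur acc h
    cases l with
    | nil =>
      simp [PySem.Chars.splitOn.go, pvSplit]
    | cons c rest =>
      simp only [PySem.Chars.splitOn.go, List.isPrefixOf, Bool.and_true]
      by_cases hc : c = '_'
      · subst hc
        simp only [beq_self_eq_true, if_true, List.length_cons] at *
        have hd : List.drop (List.length ([] : List Char) + 1) ('_' :: rest) = rest := rfl
        rw [hd]
        rw [ih rest [] (cur.reverse :: acc) (by omega)]
        simp [pvSplit]
        cases h' : pvSplit rest <;> simp [List.modifyHead]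
      · have hbeq : ('_' == c) = false := by simpa using fun h' => hc h'.symm
        rw [hbeq]
        simp only [if_false, Bool.false_eq_true]
        rw [ih rest (c :: cur) acc (by simp at h; omega)]
        simp only [pvSplit, if_neg hc]
        cases h' : pvSplit rest with
        | nil => exact absurd h' (pvSplit_ne_nil rest)
        | cons t ts => simp [List.modifyHead]

lemma pvSplitOn_eq (cs : List Char) :
    PySem.Chars.splitOn cs ['_'] = pvSplit cs := by
  rw [PySem.Chars.splitOn, pvGo_eq (cs.length + 1) cs [] [] (by omega)]
  cases h : pvSplit cs <;> simp [List.modifyHead]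

lemma pvJoin_pvSplit (cs : List Char) :
    PySem.Chars.join ['_'] (pvSplit cs) = cs := by
  induction cs with
  | nil => rfl
  | cons c rest ih =>
    simp only [pvSplit]
    by_cases hc : c = '_'
    · subst hc
      rw [if_pos rfl]
      cases h' : pvSplit rest with
      | nil => exact absurd h' (pvSplit_ne_nil rest)
      | cons t ts =>
        rw [h'] at ih
        rw [PySem.Chars.join_cons_cons, ← ih]
        simp
    · rw [if_neg hc]
      cases h' : pvSplit rest with
      | nil => exact absurd h' (pvSplit_ne_nil rest)
      | cons t ts =>
        rw [h'] at ih
        cases ts with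
        | nil =>
          rw [PySem.Chars.join_singleton] at ih ⊢
          rw [ih]
        | cons t2 ts2 =>
          rw [PySem.Chars.join_cons_cons] at ih ⊢
          rw [← ih]
          simp

lemma pvSplit_no_us (cs : List Char) (h : '_' ∉ cs) : pvSplit cs = [cs] := by
  induction cs with
  | nil => rfl
  | cons c rest ih =>
    simp only [List.mem_cons, not_or] at h
    rw [pvSplit, if_neg (fun hc => h.1 hc.symm), ih h.2]

lemma pvSplit_append (front tl : List Char) (h : '_' ∉ tl) :
    pvSplit (front ++ '_' :: tl) = pvSplit front ++ [tl] := by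
  induction front with
  | nil =>
    simp only [List.nil_append, pvSplit, pvSplit_no_us tl h]
    rfl
  | cons c f ih =>
    simp only [List.cons_append, pvSplit]
    by_cases hc : c = '_'
    · rw [if_pos hc, if_pos hc, ih]
      simp
    · rw [if_neg hc, if_neg hc, ih]
      cases h' : pvSplit f with
      | nil => exact absurd h' (pvSplit_ne_nil f)
      | cons t ts => simp

lemma pvLastUnderscore (cs : List Char) (h : '_' ∈ cs) :
    ∃ front tl, cs = front ++ '_' :: tl ∧ '_' ∉ tl := by
  induction cs using List.reverseRecOn with
  | nil => simp at h
  | append_singleton ys c ih =>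
    by_cases hc : c = '_'
    · exact ⟨ys, [], by simp [hc], by simp⟩
    · have h' : '_' ∈ ys := by
        rcases List.mem_append.1 h with h1 | h1
        · exact h1
        · simp at h1; exact absurd h1.symm hc
      obtain ⟨front, tl, e, hn⟩ := ih h'
      refine ⟨front, tl ++ [c], by simp [e], ?_⟩
      simp only [List.mem_append, List.mem_singleton, not_or]
      exact ⟨hn, fun h2 => hc h2.symm⟩

lemma pvTakeWhile_append (a b : List Char) (h : '_' ∉ a) :
    (a ++ '_' :: b).takeWhile (· != '_') = a := by
  induction a with
  | nil => simp
  | cons c a' ih =>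
    simp only [List.mem_cons, not_or] at h
    simp only [List.cons_append, List.takeWhile_cons]
    rw [if_pos (by simpa using fun hc => h.1 hc.symm), ih h.2]

lemma pvSuffix_iff (front tl t : List Char) (htl : '_' ∉ tl) (ht : '_' ∉ t) :
    ('_' :: t) <:+ (front ++ '_' :: tl) ↔ t = tl := by
  constructor
  · rintro ⟨u, hu⟩
    have h1 : (u ++ '_' :: t).reverse.takeWhile (· != '_') = t.reverse := by
      rw [show (u ++ '_' :: t).reverse = t.reverse ++ '_' :: u.reverse by simp]
      exact pvTakeWhile_append _ _ (by simpa using ht)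
    have h2 : (front ++ '_' :: tl).reverse.takeWhile (· != '_') = tl.reverse := by
      rw [show (front ++ '_' :: tl).reverse = tl.reverse ++ '_' :: front.reverse by simp]
      exact pvTakeWhile_append _ _ (by simpa using htl)
    rw [hu, h2] at h1
    have := congrArg List.reverse h1
    simpa using this.symm
  · rintro rfl
    exact ⟨front, rfl⟩

-- the two per-element transforms agree, char level
lemma pvElem_eq (cs : List Char) :
    (if PySem.List.pyGetD (pvSplit cs) (((pvSplit cs).length : Int) - 1) [] ∈ pvSessA
     then PySem.Chars.join ['_'] (pvSplit cs).dropLast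
     else cs)
    = (if pvSessSuffixesB.any (fun suf => PySem.Chars.endswith cs suf)
       then PySem.List.slice cs none (some (-3))
       else if cs ∈ pvSessB then [] else cs) := by
  by_cases hus : '_' ∈ cs
  · obtain ⟨front, tl, rfl, htl⟩ := pvLastUnderscore cs hus
    rw [pvSplit_append front tl htl]
    have hcast : (((pvSplit front ++ [tl]).length : Nat) : Int) - 1
        = (((pvSplit front).length : Nat) : Int) := by
      simp
    rw [hcast, PySem.List.pyGetD_natCast]
    have hidx : (pvSplit front ++ [tl]).getD (pvSplit front).length [] = tl := by
      simp [List.getD]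
    rw [hidx, List.dropLast_concat, pvJoin_pvSplit]
    have hmemB : (front ++ '_' :: tl) ∉ pvSessB := by
      intro hm
      have husin : '_' ∈ front ++ '_' :: tl := by simp
      simp only [pvSessB, List.mem_cons, List.not_mem_nil, or_false] at hm
      rcases hm with h | h | h | h | h | h | h | h <;> (rw [h] at husin; simp at husin)
    by_cases hsess : tl ∈ pvSessA
    · have hany : pvSessSuffixesB.any
          (fun suf => PySem.Chars.endswith (front ++ '_' :: tl) suf) = true := by
        have hmem' : ('_' :: tl) ∈ pvSessSuffixesB := by fin_cases hsess <;> decide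
        rw [List.any_eq_true]
        exact ⟨'_' :: tl, hmem', by rw [PySem.Chars.endswith_iff]; exact ⟨front, rfl⟩⟩
      rw [hany, if_pos rfl, if_pos hsess]
      have hlen2 : tl.length = 2 := by fin_cases hsess <;> rfl
      rw [PySem.List.slice_to_neg_ofNat _ 3 (by omega)]
      rw [show (front ++ '_' :: tl).length - 3 = front.length by
        simp [hlen2]]
      exact List.take_left.symm
    · have hany : pvSessSuffixesB.any
          (fun suf => PySem.Chars.endswith (front ++ '_' :: tl) suf) = false := by
        rw [List.any_eq_false]
        intro suf hsuf
        fin_cases hsuf <;>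
          exact fun hend => hsess (by
            rw [← (pvSuffix_iff front tl _ htl (by decide)).1
                ((PySem.Chars.endswith_iff _ _).1 hend)]
            decide)
      rw [hany, if_neg hsess]
      simp only [Bool.false_eq_true, if_false, if_neg hmemB]
  · rw [pvSplit_no_us cs hus]
    have hany : pvSessSuffixesB.any (fun suf => PySem.Chars.endswith cs suf) = false := by
      rw [List.any_eq_false]
      intro suf hsuf hend
      have hsx : suf <:+ cs := (PySem.Chars.endswith_iff _ _).1 hend
      have : '_' ∈ cs := hsx.subset (by fin_cases hsuf <;> decide)
      exact hus this
    rw [hany]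
    have hidx : PySem.List.pyGetD [cs] ((([cs].length : Nat) : Int) - 1) [] = cs := by
      rw [show ((([cs].length : Nat) : Int) - 1) = (((0 : Nat)) : Int) by simp,
        PySem.List.pyGetD_natCast]
      rfl
    rw [hidx]
    simp only [Bool.false_eq_true, if_false]
    have hAB : pvSessA = pvSessB := rfl
    rw [hAB]
    by_cases hm : cs ∈ pvSessB
    · rw [if_pos hm, if_pos hm]
      rfl
    · rw [if_neg hm, if_neg hm]

-- the per-element transforms agree, string level
lemma pvString_elem (s : String) :
    (if PySem.List.pyGetD (PySem.Chars.splitOn s.toList ['_'])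
          (((PySem.Chars.splitOn s.toList ['_']).length : Int) - 1) [] ∈ pvSessA
     then String.ofList (PySem.Chars.join ['_'] (PySem.Chars.splitOn s.toList ['_']).dropLast)
     else s)
    = (if pvSessSuffixesB.any (fun suf => PySem.Chars.endswith s.toList suf)
       then String.ofList (PySem.List.slice s.toList none (some (-3)))
       else if s.toList ∈ pvSessB then "" else s) := by
  have h := congrArg String.ofList (pvElem_eq s.toList)
  rw [apply_ite String.ofList, apply_ite String.ofList, apply_ite String.ofList] at h
  simp only [pvSplitOn_eq]
  simpa using h

-- ===== VERDICT (by name: the statement is the Claim_ definition above) =====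
theorem remove_ending0_spec : Claim_equal_remove_ending0 := by
  intro string1 _
  show remove_ending0 string1 = remove_ending0_alt string1
  rw [show remove_ending0 string1 = string1.foldl
      (fun a str_t =>
        if PySem.List.pyGetD (PySem.Chars.splitOn str_t.toList ['_'])
            (((PySem.Chars.splitOn str_t.toList ['_']).length : Int) - 1) [] ∈ pvSessA then
          a ++ [String.ofList (PySem.Chars.join ['_'] (PySem.Chars.splitOn str_t.toList ['_']).dropLast)]
        else a ++ [str_t]) [] from rfl]
  have hcong : ∀ (acc : List String) (x : String), x ∈ string1 →
      (if PySem.List.pyGetD (PySem.Chars.splitOn x.toList ['_'])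
            (((PySem.Chars.splitOn x.toList ['_']).length : Int) - 1) [] ∈ pvSessA then
          acc ++ [String.ofList (PySem.Chars.join ['_'] (PySem.Chars.splitOn x.toList ['_']).dropLast)]
        else acc ++ [x])
      = acc ++ [if pvSessSuffixesB.any (fun suf => PySem.Chars.endswith x.toList suf) then
           String.ofList (PySem.List.slice x.toList none (some (-3)))
         else if x.toList ∈ pvSessB then "" else x] := by
    intro acc x _
    rw [← pvString_elem x]
    split <;> rfl
  have hfold := PySem.List.foldl_congr_mem string1 _ _ ([] : List String) hcong
  rw [hfold, PySem.List.foldl_append_singleton_eq_map]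
  simp [remove_ending0_alt]
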